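/-
  Test driver: the pure model (Json/Jsmn/Model.lean) on the vectors of proofs/c6/modelcheck.py.
  `lean --run Json/Jsmn/ModelCheck.lean VECTORS` reads lines `cfg ntok pos toknext toksuper js-hex tokens-hex` (cfg d | s; ntok -1 = NULL;
  `-` = empty) and prints `r pos toknext toksuper tokens-hex` for each: jsmn_parse from that state.
-/
import Json.Jsmn.Encode
open Jsmn

def hexVal (c : Char) : Nat := if c.isDigit then c.toNat - 48 else c.toNat - 87
def unhex (s : String) : List UInt8 :=
  if s == "-" then [] else Id.run do
    let cs := s.toList.toArray
    let mut out : Array UInt8 := Array.mkEmpty (cs.size / 2)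
    for i in [0:cs.size / 2] do
      out := out.push (UInt8.ofNat (16 * hexVal cs[2 * i]! + hexVal cs[2 * i + 1]!))
    return out.toList
def hexDigit (n : Nat) : Char := Char.ofNat (if n < 10 then 48 + n else 87 + n)
def hex (bs : List UInt8) : String :=
  if bs.isEmpty then "-" else String.ofList (bs.flatMap fun b => [hexDigit (b.toNat / 16), hexDigit (b.toNat % 16)])

def main (args : List String) : IO Unit := do
  let lines ← IO.FS.lines args.head!
  for l in lines do
    match l.splitOn " " with
    | [c, ntok, pos, toknext, toksuper, js, toks] =>
      let cfg := if c == "d" then Config.default else Config.strictLinks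
      let nt := ntok.toInt!
      let p : Parser := ⟨pos.toNat!, toknext.toNat!, toksuper.toInt!⟩
      let ts := if nt < 0 then none else some (decodeTokens cfg (unhex toks))
      match parse cfg (unhex js) p ts nt.toNat with
      | none => IO.println "FUEL"
      | some (r, p', ts') =>
        IO.println s!"{r} {p'.pos} {p'.toknext} {p'.toksuper} {hex ((ts'.getD []).flatMap (Token.bytes cfg))}"
    | _ => pure ()
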